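-- pv_equiv track=rewrite | github.com/df7cb/aoc | 2016/11.py | check
-- ===== SOURCE A (Python) =====
-- def check(items):
--     generators = [x for x in items if x[1]=='G']
--     if len(generators) == 0:
--         return True
--     chips = [x for x in items if x[1]=='M']
--     for chip in chips:
--         if (chip[0], 'G') not in items:
--             return False
--     return True
-- ===== SOURCE B (Python) =====
-- def check(items):
--     flags = {}
--     any_gen = False
--     for x in items:
--         g, m = flags.get(x[0], (False, False))
--         if x[1] == 'G':
--             g = True
--             any_gen = True
--         elif x[1] == 'M':
--             m = True
--         flags[x[0]] = (g, m)
--     return (not any_gen) or all(g or not m for g, m in flags.values())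
-- ===== Notes on version B (the rewrite author's own statement) =====
-- stated objective: alternative
-- what changed: B makes one pass grouping items by element label into a dict of (has_generator, has_chip) flags plus an any-generator flag, then judges each group, instead of A's staged filter passes with a per-chip membership scan of items.
-- intended difference: On inputs where every chip's label has a generator row but some chip's generator rows are all malformed (longer than 2 entries), A returns False because its membership test only matches an exact (label, 'G') pair, while B returns True, the intended answer since a generator for that label is present. — e.g. on check([["a", "G", "z"], ["a", "M"]]): A returns false, B returns true
import Mathlib
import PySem

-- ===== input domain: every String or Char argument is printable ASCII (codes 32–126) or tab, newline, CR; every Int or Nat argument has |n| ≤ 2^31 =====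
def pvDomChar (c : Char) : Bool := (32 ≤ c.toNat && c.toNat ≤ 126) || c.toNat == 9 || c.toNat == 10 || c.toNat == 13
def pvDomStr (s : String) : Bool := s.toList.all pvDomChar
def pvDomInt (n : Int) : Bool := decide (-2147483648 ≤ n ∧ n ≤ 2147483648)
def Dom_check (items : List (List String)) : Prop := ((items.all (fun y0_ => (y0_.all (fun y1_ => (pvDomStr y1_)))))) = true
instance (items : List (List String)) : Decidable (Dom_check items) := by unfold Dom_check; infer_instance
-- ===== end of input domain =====

-- B groups the items by element label in one dict-building pass and then judges the groups,
-- instead of A's filter passes with a per-chip membership scan of items (alternative); on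
-- malformed rows longer than 2 entries B differs from A as stated at D_check below.

-- ===== PORT A =====
-- the `for chip in chips: if (chip[0], 'G') not in items: return False` loop; Python's
-- membership compares the pair (chip[0], 'G') elementwise against the rows of items, which
-- on the (element, type) pairs admitted by Pre_check is equality of the 2-element row.
def checkLoop (items : List (List String)) : List (List String) → Bool
  | [] => true
  | chip :: rest =>
      if !(items.contains [(PySem.List.pyGet? chip 0).getD "", "G"]) then false
      else checkLoop items rest

def check (items : List (List String)) : Bool :=
  let generators := items.filter (fun x => PySem.List.pyGet? x 1 == some "G")
  if generators.length == 0 then true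
  else
    let chips := items.filter (fun x => PySem.List.pyGet? x 1 == some "M")
    checkLoop items chips

-- ===== PORT B =====
-- one iteration of Source B's loop body: state = (flags dict, any_gen flag)
def bStep (st : PySem.Dict String (Bool × Bool) × Bool) (x : List String) :
    PySem.Dict String (Bool × Bool) × Bool :=
  let flags := st.1
  let anyGen := st.2
  let label := (PySem.List.pyGet? x 0).getD ""
  let gm := flags.getD label (false, false)
  let kind := (PySem.List.pyGet? x 1).getD ""
  if kind == "G" then (flags.insert label (true, gm.2), true)
  else if kind == "M" then (flags.insert label (gm.1, true), anyGen)
  else (flags.insert label (gm.1, gm.2), anyGen)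

def check_alt (items : List (List String)) : Bool :=
  let st := items.foldl bStep (PySem.Dict.empty, false)
  !st.2 || st.1.values.all (fun gm => gm.1 || !gm.2)

-- ===== PRECONDITION & SPEC =====
-- Pre_ excludes exactly the inputs on which Python A raises IndexError: a row with fewer
-- than 2 entries (A's first comprehension evaluates x[1] for every x).
def Pre_check (items : List (List String)) : Prop := ∀ x ∈ items, 2 ≤ x.length
instance (items : List (List String)) : Decidable (Pre_check items) := by unfold Pre_check; infer_instance
def pvWitness_check : List (List String) := [["a", "G"], ["a", "M"]]

-- On inputs where every chip's label has a generator row but some chip's generator rows are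
-- all longer than 2 entries (malformed (element, type) rows), A returns False — its
-- membership test only matches an exact (label, 'G') pair — while B returns True, the
-- intended answer since a generator for that label is present.
def D_check (items : List (List String)) : Prop :=
  let lbls := fun t => (items.filter (·.tail.head? == some t)).map List.head?
  lbls "M" ⊆ lbls "G" ∧ ∃ l ∈ lbls "M", [l.getD "", "G"] ∉ items
instance (items : List (List String)) : Decidable (D_check items) := by unfold D_check; infer_instance

def Spec_check (items : List (List String)) (out : Bool) : Prop :=
  ¬ D_check items → out = check_alt items
instance (items : List (List String)) (out : Bool) : Decidable (Spec_check items out) := by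
  unfold Spec_check; infer_instance

def pvDiffWitness_check : List (List String) := [["a", "G", "z"], ["a", "M"]]
def pvDiffWitnessOut_check : Bool × Bool := (false, true)

-- ===== CLAIM (what is proved, stated in full; the proofs are below) =====
def Claim_unchanged_check : Prop :=
  ∀ (items : List (List String)), Dom_check items → Pre_check items → Spec_check items (check items)
def Claim_changed_check : Prop :=
  Dom_check (pvDiffWitness_check) ∧ Pre_check (pvDiffWitness_check) ∧ D_check (pvDiffWitness_check) ∧
  check (pvDiffWitness_check) = pvDiffWitnessOut_check.1 ∧
  check_alt (pvDiffWitness_check) = pvDiffWitnessOut_check.2 ∧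
  pvDiffWitnessOut_check.1 ≠ pvDiffWitnessOut_check.2
def Claim_exact_check : Prop :=
  ∀ (items : List (List String)), Dom_check items → Pre_check items → D_check items →
    check items ≠ check_alt items

-- ===== LEMMAS AND PROOFS =====

-- abbreviations for the proofs (not used by the ports)
def lbl (x : List String) : String := (PySem.List.pyGet? x 0).getD ""
def knd (x : List String) : String := (PySem.List.pyGet? x 1).getD ""
def dStep (d : PySem.Dict String (Bool × Bool)) (x : List String) :
    PySem.Dict String (Bool × Bool) :=
  d.insert (lbl x)
    (let gm := d.getD (lbl x) (false, false)
     if knd x == "G" then (true, gm.2)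
     else if knd x == "M" then (gm.1, true) else gm)

-- the Prop both sides are compared through: every chip's label also carries a generator
def Protected (items : List (List String)) : Prop :=
  ∀ x ∈ items, PySem.List.pyGet? x 1 = some "M" →
    ∃ y ∈ items, PySem.List.pyGet? y 1 = some "G" ∧
      PySem.List.pyGet? y 0 = PySem.List.pyGet? x 0

lemma pg0 (x : List String) : PySem.List.pyGet? x 0 = x.head? := by
  cases x <;> simp [PySem.List.pyGet?, PySem.List.pyIdx?]

lemma pg1 (x : List String) : PySem.List.pyGet? x 1 = x.tail.head? := by
  match x with
  | [] => simp [PySem.List.pyGet?, PySem.List.pyIdx?]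
  | [a] => simp [PySem.List.pyGet?, PySem.List.pyIdx?]
  | a :: b :: t =>
      have h0 : (0:Int) ≤ (t.length : Int) + 1 := by positivity
      simp [PySem.List.pyGet?, PySem.List.pyIdx?, h0]

lemma knd_eq_some (x : List String) (s : String) (hs : s ≠ "") :
    knd x = s ↔ PySem.List.pyGet? x 1 = some s := by
  unfold knd
  cases h : PySem.List.pyGet? x 1 with
  | none => simp [Ne.symm hs]
  | some v => simp

lemma bStep_eq (st : PySem.Dict String (Bool × Bool) × Bool) (x : List String) :
    bStep st x = (dStep st.1 x, st.2 || (knd x == "G")) := by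
  unfold bStep dStep lbl knd
  by_cases hG : (PySem.List.pyGet? x 1).getD "" = "G" <;>
    by_cases hM : (PySem.List.pyGet? x 1).getD "" = "M" <;> simp [hG, hM]

lemma fold_fst (l : List (List String)) (d : PySem.Dict String (Bool × Bool)) (b : Bool) :
    (l.foldl bStep (d, b)).1 = l.foldl dStep d := by
  induction l generalizing d b with
  | nil => rfl
  | cons x t ih => rw [List.foldl_cons, List.foldl_cons, bStep_eq]; exact ih _ _

lemma fold_snd (l : List (List String)) (d : PySem.Dict String (Bool × Bool)) (b : Bool) :
    (l.foldl bStep (d, b)).2 = (b || l.any (fun x => knd x == "G")) := by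
  induction l generalizing d b with
  | nil => simp
  | cons x t ih =>
      rw [List.foldl_cons, bStep_eq, List.any_cons, ih]
      cases b <;> cases h : (knd x == "G") <;> simp
lemma getD_fold (l : List (List String)) (d : PySem.Dict String (Bool × Bool)) (k : String) :
    (l.foldl dStep d).getD k (false, false) =
      ((d.getD k (false, false)).1 || l.any (fun x => lbl x == k && (knd x == "G")),
       (d.getD k (false, false)).2 || l.any (fun x => lbl x == k && (knd x == "M"))) := by
  induction l generalizing d with
  | nil => simp
  | cons x t ih =>
      rw [List.foldl_cons, ih, List.any_cons, List.any_cons]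
      unfold dStep
      rw [PySem.Dict.getD_insert]
      by_cases hk : k = lbl x
      · subst hk
        cases hG : (knd x == "G") <;> cases hM2 : (knd x == "M")
        · simp [hG, hM2]
        · simp [hG, Bool.or_assoc]
        · simp [hM2, Bool.or_assoc]
        · simp only [beq_iff_eq] at hG hM2
          rw [hG] at hM2
          exact absurd hM2 (by decide)
      · have hne : (lbl x == k) = false := by
          simp only [beq_eq_false_iff_ne]; exact fun h => hk h.symm
        simp [hk, hne]

lemma keys_fold (l : List (List String)) :
    (l.foldl dStep PySem.Dict.empty).keys = PySem.Set.ofList (l.map lbl) := by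
  have h := PySem.Dict.keys_foldl_insert_key l lbl
      (fun d x =>
        (let gm := d.getD (lbl x) (false, false)
         if knd x == "G" then (true, gm.2)
         else if knd x == "M" then (gm.1, true) else gm))
      PySem.Dict.empty
  unfold dStep
  rw [h]
  simp [PySem.Set.update_nil_left]

lemma nodup_keys_fold (l : List (List String)) :
    (l.foldl dStep PySem.Dict.empty).keys.Nodup :=
  PySem.Dict.nodup_keys_foldl_insert_key l lbl _ PySem.Dict.empty PySem.Dict.nodup_keys_empty

-- characterization of B's value
lemma check_alt_char (items : List (List String)) :
    check_alt items =
      (!(items.any (fun x => knd x == "G")) ||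
        (items.map lbl).all (fun k =>
          items.any (fun x => lbl x == k && (knd x == "G")) ||
          !(items.any (fun x => lbl x == k && (knd x == "M"))))) := by
  show (!(items.foldl bStep (PySem.Dict.empty, false)).2 ||
        (items.foldl bStep (PySem.Dict.empty, false)).1.values.all (fun gm => gm.1 || !gm.2)) = _
  rw [fold_fst, fold_snd, Bool.false_or]
  have hset : ∀ f : String → Bool,
      (PySem.Set.ofList (items.map lbl)).all f = (items.map lbl).all f := by
    intro f
    rw [Bool.eq_iff_iff, List.all_eq_true, List.all_eq_true]
    constructor
    · intro h k hk; exact h k (by rw [PySem.Set.mem_ofList]; exact hk)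
    · intro h k hk; exact h k (by rwa [PySem.Set.mem_ofList] at hk)
  have hv : (items.foldl dStep PySem.Dict.empty).values.all (fun gm => gm.1 || !gm.2) =
      (items.map lbl).all (fun k =>
        items.any (fun x => lbl x == k && (knd x == "G")) ||
        !(items.any (fun x => lbl x == k && (knd x == "M")))) := by
    rw [PySem.Dict.values_eq_map_keys _ (nodup_keys_fold items) (false, false), List.all_map,
      keys_fold, hset]
    rw [Bool.eq_iff_iff, List.all_eq_true, List.all_eq_true]
    constructor
    · intro h k hk
      have := h k hk
      rw [Function.comp_apply, getD_fold] at this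
      simpa using this
    · intro h k hk
      rw [Function.comp_apply, getD_fold]
      simpa using h k hk
  rw [hv]

lemma pyGet0_of_pyGet1 (x : List String) (v : String)
    (h : PySem.List.pyGet? x 1 = some v) :
    PySem.List.pyGet? x 0 = some (lbl x) := by
  match x with
  | [] => simp [PySem.List.pyGet?, PySem.List.pyIdx?] at h
  | [a] => simp [PySem.List.pyGet?, PySem.List.pyIdx?] at h
  | a :: b :: t =>
      simp [lbl, pg0]

-- B's group condition ↔ Protected
lemma matched_iff (items : List (List String)) :
    ((items.map lbl).all (fun k =>
        items.any (fun x => lbl x == k && (knd x == "G")) ||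
        !(items.any (fun x => lbl x == k && (knd x == "M"))))) = true ↔
      Protected items := by
  unfold Protected
  simp only [List.all_eq_true, List.mem_map, List.any_eq_true, Bool.or_eq_true,
    Bool.not_eq_true', List.any_eq_false, Bool.and_eq_true, beq_iff_eq,
    forall_exists_index]
  constructor
  · intro h x hx hxM
    have hknd : knd x = "M" := (knd_eq_some x "M" (by decide)).mpr hxM
    rcases h (lbl x) x ⟨hx, rfl⟩ with h1 | h2
    · rcases h1 with ⟨y, hy, hylbl, hyG⟩
      have hyG' : PySem.List.pyGet? y 1 = some "G" := (knd_eq_some y "G" (by decide)).mp hyG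
      refine ⟨y, hy, hyG', ?_⟩
      rw [pyGet0_of_pyGet1 x _ hxM, pyGet0_of_pyGet1 y _ hyG', hylbl]
    · have := h2 x hx
      simp [hknd] at this
  · intro h k x hxk
    obtain ⟨hx, hk⟩ := hxk
    by_cases hex : ∃ z ∈ items, lbl z = k ∧ knd z = "M"
    · left
      rcases hex with ⟨z, hz, hzk, hzM⟩
      have hzM' : PySem.List.pyGet? z 1 = some "M" := (knd_eq_some z "M" (by decide)).mp hzM
      rcases h z hz hzM' with ⟨y, hy, hyG, hy0⟩
      refine ⟨y, hy, ?_, (knd_eq_some y "G" (by decide)).mpr hyG⟩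
      have : lbl y = lbl z := by
        unfold lbl
        rw [pyGet0_of_pyGet1 y _ hyG, pyGet0_of_pyGet1 z _ hzM'] at hy0
        unfold lbl at hy0
        simpa using hy0
      rw [this, hzk]
    · right
      intro z hz
      by_cases hzk : lbl z = k
      · by_cases hzM : knd z = "M"
        · exact absurd ⟨z, hz, hzk, hzM⟩ hex
        · simp [hzM]
      · simp [hzk]

-- A's loop as an `all`
lemma checkLoop_all (items chips : List (List String)) :
    checkLoop items chips = chips.all (fun c => items.contains [lbl c, "G"]) := by
  induction chips with
  | nil => simp [checkLoop]
  | cons c r ih =>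
      rw [List.all_cons, ← ih]
      show (if !(items.contains [lbl c, "G"]) then false
            else checkLoop items r) = (items.contains [lbl c, "G"] && checkLoop items r)
      cases items.contains [lbl c, "G"] <;> simp

-- A's value
lemma check_char (items : List (List String)) :
    check items = (!(items.any (fun x => knd x == "G")) ||
      (items.filter (fun x => knd x == "M")).all (fun c => items.contains [lbl c, "G"])) := by
  have hG : ∀ x : List String, (PySem.List.pyGet? x 1 == some "G") = (knd x == "G") := by
    intro x; unfold knd
    cases h : PySem.List.pyGet? x 1 with
    | none => simp
    | some v => simp
  have hM : ∀ x : List String, (PySem.List.pyGet? x 1 == some "M") = (knd x == "M") := by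
    intro x; unfold knd
    cases h : PySem.List.pyGet? x 1 with
    | none => simp
    | some v => simp
  show (if ((items.filter (fun x => PySem.List.pyGet? x 1 == some "G")).length == 0) then true
        else checkLoop items (items.filter (fun x => PySem.List.pyGet? x 1 == some "M"))) = _
  rw [checkLoop_all]
  simp only [hG, hM]
  have h0 : ((items.filter (fun x => knd x == "G")).length == 0) =
      !(items.any (fun x => knd x == "G")) := by
    rw [Bool.eq_iff_iff]
    simp [List.length_eq_zero_iff, List.filter_eq_nil_iff, List.any_eq_false]
  rw [h0]
  cases h : items.any (fun x => knd x == "G") <;> simp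

-- D_check's first conjunct ↔ Protected
lemma subset_iff (items : List (List String)) :
    ((items.filter (·.tail.head? == some "M")).map List.head? ⊆
      (items.filter (·.tail.head? == some "G")).map List.head?) ↔ Protected items := by
  unfold Protected
  simp only [pg1, pg0]
  constructor
  · intro hsub x hx hxM
    have hxm : x.head? ∈ (items.filter (·.tail.head? == some "M")).map List.head? :=
      List.mem_map.mpr ⟨x, List.mem_filter.mpr ⟨hx, by simp [hxM]⟩, rfl⟩
    obtain ⟨y, hyf, hy0⟩ := List.mem_map.mp (hsub hxm)
    obtain ⟨hy, hyG⟩ := List.mem_filter.mp hyf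
    exact ⟨y, hy, by simpa using hyG, hy0⟩
  · intro h v hv
    obtain ⟨x, hxf, rfl⟩ := List.mem_map.mp hv
    obtain ⟨hx, hxM⟩ := List.mem_filter.mp hxf
    obtain ⟨y, hy, hyG, hy0⟩ := h x hx (by simpa using hxM)
    exact List.mem_map.mpr ⟨y, List.mem_filter.mpr ⟨hy, by simp [hyG]⟩, hy0⟩

lemma D_iff (items : List (List String)) : D_check items ↔
    (Protected items ∧ ∃ c ∈ items, PySem.List.pyGet? c 1 = some "M" ∧
      [(PySem.List.pyGet? c 0).getD "", "G"] ∉ items) := by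
  unfold D_check
  dsimp only
  apply and_congr (subset_iff items)
  simp only [pg1, pg0]
  constructor
  · rintro ⟨l, hl, hni⟩
    obtain ⟨c, hcf, rfl⟩ := List.mem_map.mp hl
    obtain ⟨hc, hcM⟩ := List.mem_filter.mp hcf
    exact ⟨c, hc, by simpa using hcM, hni⟩
  · rintro ⟨c, hc, hcM, hni⟩
    exact ⟨c.head?, List.mem_map.mpr ⟨c, List.mem_filter.mpr ⟨hc, by simp [hcM]⟩, rfl⟩, hni⟩

-- ===== VERDICT (by name: the statements are the Claim_ definitions above) =====
theorem check_spec : Claim_unchanged_check := by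
  intro items _ _ hnD
  show check items = check_alt items
  rw [check_char, check_alt_char]
  cases haG : items.any (fun x => knd x == "G") with
  | false => simp
  | true =>
      simp only [Bool.not_true, Bool.false_or]
      cases hm : (items.map lbl).all (fun k =>
          items.any (fun x => lbl x == k && (knd x == "G")) ||
          !(items.any (fun x => lbl x == k && (knd x == "M")))) with
      | false =>
          have hnp : ¬ Protected items := fun hp => by
            rw [(matched_iff items).mpr hp] at hm
            exact Bool.noConfusion hm
          unfold Protected at hnp
          push_neg at hnp
          obtain ⟨x, hx, hxM, hy⟩ := hnp
          rw [List.all_eq_false]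
          refine ⟨x, List.mem_filter.mpr ⟨hx, by simp [(knd_eq_some x "M" (by decide)).mpr hxM]⟩, ?_⟩
          intro hcon
          rw [List.contains_iff_mem] at hcon
          exact hy _ hcon (by simp [pg1]) (by rw [pyGet0_of_pyGet1 x _ hxM]; simp [pg0])
      | true =>
          have hp := (matched_iff items).mp hm
          have hne : ∀ c ∈ items, PySem.List.pyGet? c 1 = some "M" →
              [(PySem.List.pyGet? c 0).getD "", "G"] ∈ items := by
            intro c hc hcM
            by_contra hni
            exact hnD ((D_iff items).mpr ⟨hp, c, hc, hcM, hni⟩)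
          rw [List.all_eq_true]
          intro c hc
          obtain ⟨hcmem, hcM⟩ := List.mem_filter.mp hc
          have hcM' : PySem.List.pyGet? c 1 = some "M" :=
            (knd_eq_some c "M" (by decide)).mp (by simpa using hcM)
          rw [List.contains_iff_mem]
          exact hne c hcmem hcM'

theorem check_changed : Claim_changed_check := by
  unfold Claim_changed_check; decide

theorem check_tight : Claim_exact_check := by
  intro items _ _ hD
  rw [D_iff] at hD
  obtain ⟨hp, c, hc, hcM, hnotin⟩ := hD
  rw [check_char, check_alt_char]
  obtain ⟨y, hy, hyG, -⟩ := hp c hc hcM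
  have haG : items.any (fun x => knd x == "G") = true :=
    List.any_eq_true.mpr ⟨y, hy, by simp [(knd_eq_some y "G" (by decide)).mpr hyG]⟩
  have hm : ((items.map lbl).all (fun k =>
      items.any (fun x => lbl x == k && (knd x == "G")) ||
      !(items.any (fun x => lbl x == k && (knd x == "M"))))) = true :=
    (matched_iff items).mpr hp
  simp [haG, hm]
  exact ⟨c, hc, (knd_eq_some c "M" (by decide)).mpr hcM, hnotin⟩
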